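-- pv_equiv track=rewrite | github.com/ozzuworld/June | June/services/june-orchestrator/app/services/skill_orchestrator.py | _is_confirmation_phrase
-- ===== SOURCE A (Python) =====
-- def _is_confirmation_phrase(text: str) -> bool:
--     """
--     Check if text is a confirmation/affirmation phrase.
--
--     Args:
--         text: User text to check
--
--     Returns:
--         True if text appears to be confirming
--     """
--     text_lower = text.lower().strip()
--
--     # Affirmative patterns
--     affirmatives = [
--         "yes", "yeah", "yep", "yup", "sure", "ok", "okay",
--         "alright", "go ahead", "proceed", "continue", "do it",
--         "affirmative", "correct", "right", "absolutely", "definitely"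
--     ]
--
--     # Check if text starts with or contains affirmatives
--     for affirm in affirmatives:
--         if text_lower == affirm or text_lower.startswith(affirm + " "):
--             return True
--
--     return False
-- ===== SOURCE B (Python) =====
-- _ONE_WORD = frozenset([
--     "yes", "yeah", "yep", "yup", "sure", "ok", "okay",
--     "alright", "proceed", "continue",
--     "affirmative", "correct", "right", "absolutely", "definitely"
-- ])
-- _TWO_WORD = frozenset([("go", "ahead"), ("do", "it")])
--
--
-- def _is_confirmation_phrase(text: str) -> bool:
--     text_lower = text.lower().strip()
--     first, _, rest = text_lower.partition(" ")
--     if first in _ONE_WORD: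
--         return True
--     second = rest.partition(" ")[0]
--     return (first, second) in _TWO_WORD
-- ===== Notes on version B (the rewrite author's own statement) =====
-- stated objective: idiomatic
-- what changed: B replaces A's loop comparing the text against each of the 17 phrases (equality or 'phrase + space' prefix) by tokenizing once with str.partition on a single space and testing the first word against a frozenset of one-word phrases and the first two words against a frozenset of word pairs.
import Mathlib
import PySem

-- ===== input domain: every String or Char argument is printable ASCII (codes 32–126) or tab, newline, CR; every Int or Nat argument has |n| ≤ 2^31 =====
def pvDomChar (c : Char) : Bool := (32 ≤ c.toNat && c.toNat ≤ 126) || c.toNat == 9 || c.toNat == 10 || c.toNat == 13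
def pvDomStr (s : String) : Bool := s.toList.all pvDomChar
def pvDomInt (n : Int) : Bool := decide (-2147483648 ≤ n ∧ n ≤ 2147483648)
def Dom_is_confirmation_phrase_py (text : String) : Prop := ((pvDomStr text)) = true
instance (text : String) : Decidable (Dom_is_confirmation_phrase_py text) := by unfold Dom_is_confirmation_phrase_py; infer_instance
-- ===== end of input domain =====

-- B replaces A's per-phrase comparison loop by tokenizing once with str.partition on a single space and
-- testing the first one or two words against constant sets (objective: idiomatic).

-- ===== PORT A =====
-- the affirmatives list, in A's order
def pvAffirmatives : List (List Char) :=
  ["yes".toList, "yeah".toList, "yep".toList, "yup".toList, "sure".toList, "ok".toList,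
   "okay".toList, "alright".toList, "go ahead".toList, "proceed".toList, "continue".toList,
   "do it".toList, "affirmative".toList, "correct".toList, "right".toList,
   "absolutely".toList, "definitely".toList]

-- the for-loop with early return is List.any over the same list, same test, same order
def is_confirmation_phrase_py (text : String) : Bool :=
  let text_lower := PySem.Chars.strip (PySem.Chars.lower text.toList)
  pvAffirmatives.any (fun affirm =>
    decide (text_lower = affirm) || PySem.Chars.startswith text_lower (affirm ++ [' ']))

-- ===== PORT B =====
def pvOneWord : List (List Char) :=
  ["yes".toList, "yeah".toList, "yep".toList, "yup".toList, "sure".toList, "ok".toList,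
   "okay".toList, "alright".toList, "proceed".toList, "continue".toList,
   "affirmative".toList, "correct".toList, "right".toList, "absolutely".toList,
   "definitely".toList]

def pvTwoWord : List (List Char × List Char) :=
  [("go".toList, "ahead".toList), ("do".toList, "it".toList)]

-- hand port of str.partition on a single space, keeping (before, after): exact — the part before the first
-- space and the part after it ("" when there is no space)
def pvPartitionSpace (l : List Char) : List Char × List Char :=
  (l.takeWhile (· != ' '), (l.dropWhile (· != ' ')).tail)

def is_confirmation_phrase_py_alt (text : String) : Bool :=
  let text_lower := PySem.Chars.strip (PySem.Chars.lower text.toList)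
  let p := pvPartitionSpace text_lower
  if pvOneWord.contains p.1 then true
  else pvTwoWord.contains (p.1, (pvPartitionSpace p.2).1)

-- ===== PRECONDITION & SPEC =====
def Spec_is_confirmation_phrase_py (text : String) (out : Bool) : Prop := out = is_confirmation_phrase_py_alt text
instance (text : String) (out : Bool) : Decidable (Spec_is_confirmation_phrase_py text out) := by unfold Spec_is_confirmation_phrase_py; infer_instance

-- ===== CLAIM (what is proved, stated in full; the proofs are below) =====
def Claim_equal_is_confirmation_phrase_py : Prop := ∀ (text : String), Dom_is_confirmation_phrase_py text → Spec_is_confirmation_phrase_py text (is_confirmation_phrase_py text)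

-- ===== LEMMAS AND PROOFS =====

-- words made only of non-space characters are fixed by takeWhile (· != ' ')
theorem pv_takeWhile_self (a : List Char) (h : ∀ c ∈ a, (c != ' ') = true) :
    a.takeWhile (· != ' ') = a :=
  List.takeWhile_eq_self_iff.mpr h

theorem pv_takeWhile_word (a s : List Char) (h : ∀ c ∈ a, (c != ' ') = true) :
    (a ++ ' ' :: s).takeWhile (· != ' ') = a := by
  rw [List.takeWhile_append, pv_takeWhile_self a h]
  simp

theorem pv_dropWhile_word (a s : List Char) (h : ∀ c ∈ a, (c != ' ') = true) :
    (a ++ ' ' :: s).dropWhile (· != ' ') = ' ' :: s := by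
  rw [List.dropWhile_append, List.dropWhile_eq_nil_iff.mpr h]
  simp

theorem pv_pair_beq (a b c d : List Char) : ((a, b) == (c, d)) = ((a == c) && (b == d)) := rfl

-- characterization of A's per-phrase test for a one-word phrase
theorem pv_one (a t : List Char) (h : ∀ c ∈ a, (c != ' ') = true) :
    (decide (t = a) || PySem.Chars.startswith t (a ++ [' ']))
      = (t.takeWhile (· != ' ') == a) := by
  rw [Bool.eq_iff_iff]
  simp only [Bool.or_eq_true, decide_eq_true_eq, PySem.Chars.startswith_iff, beq_iff_eq]
  constructor
  · rintro (rfl | ⟨s, rfl⟩)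
    · exact pv_takeWhile_self _ h
    · rw [List.append_assoc, List.singleton_append]
      exact pv_takeWhile_word _ s h
  · intro ht
    have hsplit := List.takeWhile_append_dropWhile (p := (· != ' ')) (l := t)
    rcases hd : t.dropWhile (· != ' ') with _ | ⟨c, r⟩
    · left; rw [← hsplit, hd, ht, List.append_nil]
    · have hc : (c != ' ') = false := by
        have := List.head_dropWhile_not (· != ' ') (l := t) (by rw [hd]; simp)
        simpa [hd] using this
      have hc' : c = ' ' := by simpa using hc
      right
      refine ⟨r, ?_⟩
      rw [← hsplit, hd, ht, hc', List.append_assoc, List.singleton_append]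

-- characterization of A's per-phrase test for a two-word phrase
theorem pv_two (a b t : List Char) (ha : ∀ c ∈ a, (c != ' ') = true)
    (hb : ∀ c ∈ b, (c != ' ') = true) (hb0 : b ≠ []) :
    (decide (t = a ++ ' ' :: b) || PySem.Chars.startswith t (a ++ ' ' :: b ++ [' ']))
      = ((t.takeWhile (· != ' ') == a)
          && (((t.dropWhile (· != ' ')).tail).takeWhile (· != ' ') == b)) := by
  rw [Bool.eq_iff_iff]
  simp only [Bool.or_eq_true, Bool.and_eq_true, decide_eq_true_eq,
    PySem.Chars.startswith_iff, beq_iff_eq]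
  constructor
  · rintro (rfl | ⟨s, rfl⟩)
    · rw [pv_takeWhile_word a b ha, pv_dropWhile_word a b ha, List.tail_cons,
        pv_takeWhile_self b hb]
      exact ⟨rfl, rfl⟩
    · have hre : (a ++ ' ' :: b ++ [' ']) ++ s = a ++ ' ' :: (b ++ ' ' :: s) := by
        simp
      rw [hre, pv_takeWhile_word a _ ha, pv_dropWhile_word a _ ha, List.tail_cons,
        pv_takeWhile_word b s hb]
      exact ⟨rfl, rfl⟩
  · rintro ⟨h1, h2⟩
    have hsplit := List.takeWhile_append_dropWhile (p := (· != ' ')) (l := t)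
    rcases hd : t.dropWhile (· != ' ') with _ | ⟨c, r⟩
    · exfalso; apply hb0; rw [← h2, hd, List.tail_nil, List.takeWhile_nil]
    · have hc : (c != ' ') = false := by
        have := List.head_dropWhile_not (· != ' ') (l := t) (by rw [hd]; simp)
        simpa [hd] using this
      have hc' : c = ' ' := by simpa using hc
      rw [hd, List.tail_cons] at h2
      -- r begins with word b: either r = b or r = b ++ ' ' :: s
      have hr := (Bool.eq_iff_iff.mp (pv_one b r hb)).mpr (by simpa using h2)
      simp only [Bool.or_eq_true, decide_eq_true_eq, PySem.Chars.startswith_iff] at hr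
      rcases hr with rfl | ⟨s, hs⟩
      · left; rw [← hsplit, hd, h1, hc']
      · right
        refine ⟨s, ?_⟩
        rw [← hsplit, hd, h1, hc', ← hs]
        simp

set_option maxRecDepth 8192 in
set_option maxHeartbeats 4000000 in
theorem is_confirmation_phrase_py_spec : Claim_equal_is_confirmation_phrase_py := by
  unfold Claim_equal_is_confirmation_phrase_py
  intro text _
  unfold Spec_is_confirmation_phrase_py
  simp only [is_confirmation_phrase_py, is_confirmation_phrase_py_alt]
  set t := PySem.Chars.strip (PySem.Chars.lower text.toList) with ht
  simp only [pvAffirmatives, pvOneWord, pvTwoWord, pvPartitionSpace,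
    List.any_cons, List.any_nil, List.contains_cons, List.contains_nil]
  rw [show ("go ahead".toList : List Char) = "go".toList ++ ' ' :: "ahead".toList by decide,
      show ("do it".toList : List Char) = "do".toList ++ ' ' :: "it".toList by decide]
  rw [pv_one "yes".toList t (by simp), pv_one "yeah".toList t (by simp),
      pv_one "yep".toList t (by simp), pv_one "yup".toList t (by simp),
      pv_one "sure".toList t (by simp), pv_one "ok".toList t (by simp),
      pv_one "okay".toList t (by simp), pv_one "alright".toList t (by simp),
      pv_one "proceed".toList t (by simp), pv_one "continue".toList t (by simp),
      pv_one "affirmative".toList t (by simp), pv_one "correct".toList t (by simp),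
      pv_one "right".toList t (by simp), pv_one "absolutely".toList t (by simp),
      pv_one "definitely".toList t (by simp),
      pv_two "go".toList "ahead".toList t (by simp) (by simp) (by simp),
      pv_two "do".toList "it".toList t (by simp) (by simp) (by simp)]
  simp only [Bool.if_true_left, Bool.or_false, pv_pair_beq, Bool.decide_eq_true]
  ac_rfl

-- ===== VERDICT (by name: the statement is the Claim_ definition above) =====
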